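-- pv_equiv track=rewrite | github.com/Lindooren/CAINA-assembler-is-not-assembler-RE- | modules/opcode_operations/type_check.py | BinaryNumberCheck
-- ===== SOURCE A (Python) =====
-- def BinaryNumberCheck (number):
--     if number[0] == "B" or number[0] == "b":
--         number = RemoveB(number)
--         if len(number) > 0:
--             ValidNumbers = "01"
--             for bit in number:
--                 if not (bit in ValidNumbers):
--                     return False
--
--         else:
--             return False
--
--         return True
--     else:
--         return False
--
-- def RemoveB (binary):
--     temp = list(binary)
--     temp.pop(0)
--     return "".join(temp)
-- ===== SOURCE B (Python) =====
-- def BinaryNumberCheck(number):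
--     if number[0] == "B" or number[0] == "b":
--         return len(number) > 1 and number.count("0") + number.count("1") == len(number) - 1
--     else:
--         return False
-- ===== Notes on version B (the rewrite author's own statement) =====
-- stated objective: alternative
-- what changed: Replaces the char-by-char validation loop with early return by an arithmetic check: count the occurrences of each of the two binary digits in the string and compare their sum to the length of the part after the prefix.
import Mathlib
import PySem

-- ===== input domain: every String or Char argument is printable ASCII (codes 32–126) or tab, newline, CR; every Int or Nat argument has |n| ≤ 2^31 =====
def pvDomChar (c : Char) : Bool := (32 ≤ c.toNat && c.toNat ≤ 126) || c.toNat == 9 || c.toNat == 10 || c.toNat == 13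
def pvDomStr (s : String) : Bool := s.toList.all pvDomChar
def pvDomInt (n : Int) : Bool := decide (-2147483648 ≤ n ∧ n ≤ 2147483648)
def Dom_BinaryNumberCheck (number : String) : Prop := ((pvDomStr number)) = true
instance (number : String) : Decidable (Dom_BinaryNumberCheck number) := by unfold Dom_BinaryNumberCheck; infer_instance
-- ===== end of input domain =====

-- B replaces A's character-scan loop by an arithmetic check (count('0')+count('1') vs length); objective: alternative.
-- ===== PORT A =====
def pvRemoveB (binary : String) : String :=
  match PySem.List.pop? binary.toList 0 with
  | some (_, rest) => String.ofList rest
  | none => ""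

def pvALoop : List Char → Bool
  | [] => true
  | b :: bs => if ¬ (b ∈ "01".toList) then false else pvALoop bs

def BinaryNumberCheck (number : String) : Bool :=
  match PySem.Str.pyGet? number 0 with
  | none => false  -- number[0] raises IndexError: excluded by Pre_
  | some c =>
    if c = 'B' ∨ c = 'b' then
      let n := pvRemoveB number
      if n.toList.length > 0 then pvALoop n.toList
      else false
    else false

-- ===== PORT B =====
def BinaryNumberCheck_alt (number : String) : Bool :=
  match PySem.Str.pyGet? number 0 with
  | none => false  -- number[0] raises IndexError: excluded by Pre_
  | some c =>
    if c = 'B' ∨ c = 'b' then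
      decide (PySem.Str.len number > 1) &&
      decide ((PySem.Str.count number "0" : Int) + (PySem.Str.count number "1" : Int)
               = PySem.Str.len number - 1)
    else false

-- ===== PRECONDITION & SPEC =====
-- Pre_ excludes only the empty string, on which A (and B) raise IndexError at number[0].
def Pre_BinaryNumberCheck (number : String) : Prop := number ≠ ""
instance (number : String) : Decidable (Pre_BinaryNumberCheck number) := by unfold Pre_BinaryNumberCheck; infer_instance
def pvWitness_BinaryNumberCheck : String := "B101"
def Spec_BinaryNumberCheck (number : String) (out : Bool) : Prop := out = BinaryNumberCheck_alt number
instance (number : String) (out : Bool) : Decidable (Spec_BinaryNumberCheck number out) := by unfold Spec_BinaryNumberCheck; infer_instance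

-- ===== CLAIM (what is proved, stated in full; the proofs are below) =====
def Claim_equal_BinaryNumberCheck : Prop := ∀ (number : String), Dom_BinaryNumberCheck number → Pre_BinaryNumberCheck number → Spec_BinaryNumberCheck number (BinaryNumberCheck number)

-- ===== LEMMAS AND PROOFS =====
-- Python's str.count with a single-character pattern is List.count.
theorem pv_go_single (c : Char) (l : List Char) : ∀ (fuel acc : Nat), l.length ≤ fuel →
    PySem.Chars.count.go [c] fuel l acc = acc + l.count c := by
  induction l with
  | nil => intro fuel acc _; cases fuel <;> simp [PySem.Chars.count.go]
  | cons h t ih =>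
    intro fuel acc hle
    cases fuel with
    | zero => simp at hle
    | succ n =>
      rw [PySem.Chars.count.go]
      by_cases hc : h = c
      · simp [hc, List.isPrefixOf, ih n (acc+1) (by simpa using hle)]
        ring
      · simp [List.isPrefixOf, Ne.symm hc, hc, ih n acc (by simpa using hle)]

theorem pv_count_single (c : Char) (l : List Char) : PySem.Chars.count l [c] = l.count c := by
  simp [PySem.Chars.count, pv_go_single c l l.length 0 le_rfl]

-- A's loop accepts exactly lists all of whose characters are '0' or '1'.
theorem pvALoop_eq_all (l : List Char) : pvALoop l = l.all (fun c => c ∈ "01".toList) := by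
  induction l with
  | nil => rfl
  | cons b bs ih =>
    simp only [pvALoop, List.all_cons, ih]
    by_cases h : b ∈ "01".toList <;> simp_all

-- counting '0's and '1's together counts the characters that are '0' or '1'.
theorem pv_count_add (l : List Char) :
    l.count '0' + l.count '1' = l.countP (fun x => x == '0' || x == '1') := by
  induction l with
  | nil => rfl
  | cons h t ih =>
    by_cases h0 : h = '0' <;> by_cases h1 : h = '1' <;>
      simp [List.count_cons, List.countP_cons, h0, h1, ih] <;> omega

-- ===== VERDICT (by name: the statement is the Claim_ definition above) =====
theorem BinaryNumberCheck_spec : Claim_equal_BinaryNumberCheck := by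
  intro number _ hpre
  unfold Spec_BinaryNumberCheck BinaryNumberCheck BinaryNumberCheck_alt
  have hne : number.toList ≠ [] := by
    intro h
    apply hpre
    have := congrArg String.ofList h
    simpa using this
  cases hl : number.toList with
  | nil => exact absurd hl hne
  | cons c cs =>
    have hget : PySem.Str.pyGet? number 0 = some c := by
      simp [PySem.Str.pyGet?, hl, PySem.List.pyGet?, PySem.List.pyIdx?]
    rw [hget]
    by_cases hc : c = 'B' ∨ c = 'b'
    · simp only [hc, if_pos]
      have hrb : pvRemoveB number = String.ofList cs := by
        unfold pvRemoveB
        simp [hl, PySem.List.pop?_zero_cons]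
      have hcB : c ≠ '0' ∧ c ≠ '1' := by rcases hc with h | h <;> simp [h]
      have hc0 : PySem.Str.count number "0" = cs.count '0' := by
        rw [PySem.Str.count_eq]
        have : ("0" : String).toList = ['0'] := rfl
        rw [this, hl, pv_count_single, List.count_cons]
        simp [hcB.1]
      have hc1 : PySem.Str.count number "1" = cs.count '1' := by
        rw [PySem.Str.count_eq]
        have : ("1" : String).toList = ['1'] := rfl
        rw [this, hl, pv_count_single, List.count_cons]
        simp [hcB.2]
      have hlen : PySem.Str.len number = (cs.length : Int) + 1 := by
        simp [PySem.Str.len_eq, hl]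
      rw [hrb, hc0, hc1, hlen]
      have htl : (String.ofList cs).toList = cs := by simp
      rw [htl, pvALoop_eq_all]
      -- both sides reduce to: cs nonempty and every char of cs is '0' or '1'
      have hcnt := pv_count_add cs
      have hle := List.countP_le_length (l := cs) (p := fun x => x == '0' || x == '1')
      by_cases hall : cs.all (fun c => c ∈ "01".toList)
      · have : cs.countP (fun x => x == '0' || x == '1') = cs.length := by
          rw [List.countP_eq_length]
          intro a ha
          have := List.all_eq_true.mp hall a ha
          simpa using this
        cases cs with
        | nil => simp
        | cons d ds =>
          have h1 : (0:Nat) < (d :: ds).length := Nat.succ_pos _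
          simp only [gt_iff_lt, h1, if_pos, hall]
          rw [eq_comm, Bool.and_eq_true, decide_eq_true_iff, decide_eq_true_iff]
          simp only [List.length_cons] at this hcnt ⊢
          constructor
          · push_cast; omega
          · push_cast; omega
      · have hlt : cs.countP (fun x => x == '0' || x == '1') < cs.length := by
          rcases Nat.lt_or_ge (cs.countP (fun x => x == '0' || x == '1')) cs.length with h | h
          · exact h
          · exfalso
            apply hall
            rw [List.all_eq_true]
            intro a ha
            have heq : cs.countP (fun x => x == '0' || x == '1') = cs.length := le_antisymm hle h
            have := (List.countP_eq_length).mp heq a ha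
            simpa using this
        simp only [hall]
        have hif : (if cs.length > 0 then false else false) = false := by split <;> rfl
        rw [hif, eq_comm, Bool.eq_false_iff]
        intro hcontra
        rw [Bool.and_eq_true, decide_eq_true_iff, decide_eq_true_iff] at hcontra
        have := hcontra.2
        push_cast at this
        omega
    · simp [hc]
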